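-- pv_equiv track=rewrite | github.com/paladin8/infer | src/infer/structured/json_schema.py | _escape_for_regex
-- ===== SOURCE A (Python) =====
-- _REGEX_SPECIAL = set("\\[](){}|*+?.")
--
-- def _escape_for_regex(text: str) -> str:
--     """Escape a literal string for inclusion in a regex pattern.
--
--     Args:
--         text: The literal string to escape.
--
--     Returns:
--         Escaped string safe for regex concatenation.
--     """
--     result: list[str] = []
--     for ch in text:
--         if ch in _REGEX_SPECIAL:
--             result.append("\\" + ch)
--         elif ch == "\n":
--             result.append("\\n")
--         elif ch == "\t":
--             result.append("\\t")
--         elif ch == "\r":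
--             result.append("\\r")
--         else:
--             result.append(ch)
--     return "".join(result)
-- ===== SOURCE B (Python) =====
-- _SPECIALS = "\\[](){}|*+?."  # backslash FIRST so that backslashes inserted by later passes are not re-escaped
--
--
-- def _escape_for_regex(text: str) -> str:
--     """Escape a literal string for inclusion in a regex pattern.
--
--     Staged whole-string passes: one str.replace per special character
--     (backslash first), then the three control characters.
--     """
--     for c in _SPECIALS:
--         text = text.replace(c, "\\" + c)
--     return text.replace("\n", "\\n").replace("\t", "\\t").replace("\r", "\\r")
-- ===== Notes on version B (the rewrite author's own statement) =====
-- stated objective: faster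
-- what changed: Replaced A's single Python-level pass with a per-character branch cascade and list accumulator by staged whole-string str.replace passes (backslash escaped first so later insertions are never re-escaped), moving all per-character work into C-level replace.
import Mathlib
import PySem

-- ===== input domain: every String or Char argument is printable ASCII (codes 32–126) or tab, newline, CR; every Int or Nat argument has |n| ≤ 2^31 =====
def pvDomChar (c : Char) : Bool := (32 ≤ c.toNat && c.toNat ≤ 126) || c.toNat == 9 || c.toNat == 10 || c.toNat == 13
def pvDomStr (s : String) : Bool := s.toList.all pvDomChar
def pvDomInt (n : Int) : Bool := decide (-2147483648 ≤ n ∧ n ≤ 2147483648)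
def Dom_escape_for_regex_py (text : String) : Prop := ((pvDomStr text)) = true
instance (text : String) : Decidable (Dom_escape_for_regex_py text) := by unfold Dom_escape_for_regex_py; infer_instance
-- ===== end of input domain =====

-- B replaces A's single per-character branch-cascade pass with staged whole-string
-- str.replace passes (backslash first); same O(n) cost, a different decomposition.

-- ===== PORT A =====
-- _REGEX_SPECIAL = set("\[](){}|*+?.")
def regexSpecial : PySem.Set Char := PySem.Set.ofList "\\[](){}|*+?.".toList

-- per-iteration body of A's for-loop: the appended piece for one character
def escapeCharA (ch : Char) : List Char :=
  if PySem.Set.contains regexSpecial ch then '\\' :: [ch]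
  else if ch = '\n' then ['\\', 'n']
  else if ch = '\t' then ['\\', 't']
  else if ch = '\r' then ['\\', 'r']
  else [ch]

def escape_for_regex_py (text : String) : String :=
  -- result = []; for ch in text: result.append(...); return "".join(result)
  let result : List (List Char) :=
    text.toList.foldl (fun acc ch => acc ++ [escapeCharA ch]) []
  String.ofList (PySem.Chars.join [] result)

-- ===== PORT B =====
-- for c in _SPECIALS: text = text.replace(c, "\\"+c); then the three control chars
def escape_for_regex_py_alt (text : String) : String :=
  let t1 := "\\[](){}|*+?.".toList.foldl
    (fun s c => PySem.Chars.replace s [c] ('\\' :: [c])) text.toList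
  let t2 := PySem.Chars.replace t1 ['\n'] ['\\', 'n']
  let t3 := PySem.Chars.replace t2 ['\t'] ['\\', 't']
  String.ofList (PySem.Chars.replace t3 ['\r'] ['\\', 'r'])

-- ===== PRECONDITION & SPEC =====
def Spec_escape_for_regex_py (text : String) (out : String) : Prop := out = escape_for_regex_py_alt text
instance (text : String) (out : String) : Decidable (Spec_escape_for_regex_py text out) := by unfold Spec_escape_for_regex_py; infer_instance

-- ===== CLAIM (what is proved, stated in full; the proofs are below) =====
def Claim_equal_escape_for_regex_py : Prop := ∀ (text : String), Dom_escape_for_regex_py text → Spec_escape_for_regex_py text (escape_for_regex_py text)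

-- ===== LEMMAS AND PROOFS =====

-- replacing a SINGLE-character pattern is a per-character flatMap
def stageF (c : Char) (new : List Char) : Char → List Char :=
  fun ch => if ch = c then new else [ch]

theorem replace_go_single (c : Char) (new : List Char) :
    ∀ (l : List Char) (fuel : Nat) (acc : List Char), l.length ≤ fuel →
      PySem.Chars.replace.go [c] new fuel l acc =
        acc.reverse ++ l.flatMap (stageF c new) := by
  intro l
  induction l with
  | nil =>
    intro fuel acc _
    cases fuel <;> simp [PySem.Chars.replace.go]
  | cons ch t ih =>
    intro fuel acc hf
    cases fuel with
    | zero => simp at hf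
    | succ n =>
      by_cases h : ch = c
      · subst h
        rw [PySem.Chars.replace.go]
        rw [show ([ch].isPrefixOf (ch :: t)) = true by simp [List.isPrefixOf]]
        simp only [if_true, List.length_nil, List.length_cons, List.drop_succ_cons, List.drop_zero]
        rw [ih _ _ (Nat.le_of_succ_le_succ (by simpa using hf))]
        simp [stageF]
      · rw [PySem.Chars.replace.go]
        rw [show ([c].isPrefixOf (ch :: t)) = false by
          simp [List.isPrefixOf]; exact fun hc => absurd hc.symm h]
        simp only [Bool.false_eq_true, if_false]
        rw [ih _ _ (Nat.le_of_succ_le_succ hf)]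
        simp [stageF, h]

theorem replace_single (l : List Char) (c : Char) (new : List Char) :
    PySem.Chars.replace l [c] new = l.flatMap (stageF c new) := by
  rw [PySem.Chars.replace]
  simp only [List.isEmpty_cons, Bool.false_eq_true, if_false]
  exact replace_go_single c new l l.length [] (le_refl _)

-- the 15 stages of B's pipeline as data: (pattern char, replacement)
def allStages : List (Char × List Char) :=
  [('\\', ['\\', '\\']), ('[', ['\\', '[']), (']', ['\\', ']']),
   ('(', ['\\', '(']), (')', ['\\', ')']), ('{', ['\\', '{']),
   ('}', ['\\', '}']), ('|', ['\\', '|']), ('*', ['\\', '*']),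
   ('+', ['\\', '+']), ('?', ['\\', '?']), ('.', ['\\', '.']),
   ('\n', ['\\', 'n']), ('\t', ['\\', 't']), ('\r', ['\\', 'r'])]

def applyStages (ss : List (Char × List Char)) (l : List Char) : List Char :=
  ss.foldl (fun s p => s.flatMap (stageF p.1 p.2)) l

theorem applyStages_append (ss : List (Char × List Char)) :
    ∀ (a b : List Char), applyStages ss (a ++ b) = applyStages ss a ++ applyStages ss b := by
  induction ss with
  | nil => intro a b; rfl
  | cons p ps ih =>
    intro a b
    simp only [applyStages, List.foldl_cons, List.flatMap_append]
    exact ih _ _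

-- B's whole pipeline on a single character agrees with A's branch cascade
theorem perChar_agree (ch : Char) :
    applyStages allStages [ch] = escapeCharA ch := by
  by_cases h1 : ch = '\\'; · subst h1; rfl
  by_cases h2 : ch = '['; · subst h2; rfl
  by_cases h3 : ch = ']'; · subst h3; rfl
  by_cases h4 : ch = '('; · subst h4; rfl
  by_cases h5 : ch = ')'; · subst h5; rfl
  by_cases h6 : ch = '{'; · subst h6; rfl
  by_cases h7 : ch = '}'; · subst h7; rfl
  by_cases h8 : ch = '|'; · subst h8; rfl
  by_cases h9 : ch = '*'; · subst h9; rfl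
  by_cases h10 : ch = '+'; · subst h10; rfl
  by_cases h11 : ch = '?'; · subst h11; rfl
  by_cases h12 : ch = '.'; · subst h12; rfl
  by_cases h13 : ch = '\n'; · subst h13; rfl
  by_cases h14 : ch = '\t'; · subst h14; rfl
  by_cases h15 : ch = '\r'; · subst h15; rfl
  simp [applyStages, allStages, stageF, escapeCharA, regexSpecial,
    PySem.Set.contains, PySem.Set.ofList,
    h1, h2, h3, h4, h5, h6, h7, h8, h9, h10, h11, h12, h13, h14, h15]

theorem applyStages_all (l : List Char) :
    applyStages allStages l = l.flatMap escapeCharA := by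
  induction l with
  | nil => rfl
  | cons ch t ih =>
    have : (ch :: t) = [ch] ++ t := rfl
    rw [this, applyStages_append, ih, perChar_agree]
    rfl

-- "".join with empty separator is plain concatenation
theorem join_empty_sep_eq_flatten (ps : List (List Char)) :
    PySem.Chars.join [] ps = ps.flatten := by
  induction ps with
  | nil => rfl
  | cons p ps ih =>
    cases ps with
    | nil => simp [PySem.Chars.join, List.intercalate]
    | cons q qs => simp_all [PySem.Chars.join, List.intercalate]

-- join of the pieces accumulated by A's loop = concatenation of the mapped pieces
theorem joinA_eq (l : List Char) :
    PySem.Chars.join [] (l.foldl (fun acc ch => acc ++ [escapeCharA ch]) []) =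
      l.flatMap escapeCharA := by
  rw [PySem.List.foldl_append_singleton_eq_map]
  simp [join_empty_sep_eq_flatten, List.flatMap_def]

-- B's staged passes concatenated = A's single-pass mapping
theorem altCore_eq (l : List Char) :
    PySem.Chars.replace
      (PySem.Chars.replace
        (PySem.Chars.replace
          ("\\[](){}|*+?.".toList.foldl
            (fun s c => PySem.Chars.replace s [c] ('\\' :: [c])) l)
          ['\n'] ['\\', 'n']) ['\t'] ['\\', 't']) ['\r'] ['\\', 'r'] =
      l.flatMap escapeCharA := by
  have h : PySem.Chars.replace
      (PySem.Chars.replace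
        (PySem.Chars.replace
          ("\\[](){}|*+?.".toList.foldl
            (fun s c => PySem.Chars.replace s [c] ('\\' :: [c])) l)
          ['\n'] ['\\', 'n']) ['\t'] ['\\', 't']) ['\r'] ['\\', 'r'] =
      applyStages allStages l := by
    simp only [show "\\[](){}|*+?.".toList =
      ['\\', '[', ']', '(', ')', '{', '}', '|', '*', '+', '?', '.'] from rfl,
      List.foldl_cons, List.foldl_nil, replace_single, applyStages, allStages]
  rw [h, applyStages_all]

-- ===== VERDICT (by name: the statement is the Claim_ definition above) =====
theorem escape_for_regex_py_spec : Claim_equal_escape_for_regex_py := by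
  intro text _
  unfold Spec_escape_for_regex_py escape_for_regex_py escape_for_regex_py_alt
  simp only [joinA_eq, altCore_eq]
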